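-- pv_equiv track=rewrite | github.com/kkkbird/pyutils | printpdf/printpdf.py | order_for_printer
-- ===== SOURCE A (Python) =====
-- STYLE_ONE_PER_PAGE = 0
--
-- STYLE_TWO_PER_PAGE = 1
--
-- def order_for_printer(count, style):
--     if style == STYLE_ONE_PER_PAGE:
--         all_count = count if count % 2 == 0 else count + 1
--         for i in range(0, all_count, 2):
--             yield i
--         if all_count != count:
--             yield -1
--         yield -2
--         for i in range(all_count - 1, 0, -2):
--             yield i
--
--     elif style == STYLE_TWO_PER_PAGE:
--         all_count = (count + 3) >> 2 << 2
--         for i in range(0, all_count >> 1, 2):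
--             j = all_count - i - 1
--             yield j if j < count else -1
--             yield i
--         yield -2
--         for i in range((all_count >> 1) - 1, 0, -2):
--             yield i
--             j = all_count - i - 1
--             yield j if j < count else -1
-- ===== SOURCE B (Python) =====
-- STYLE_ONE_PER_PAGE = 0
--
-- STYLE_TWO_PER_PAGE = 1
--
--
-- def order_for_printer(count, style):
--     # One sheet-by-sheet loop building both halves at once: fronts appended,
--     # backs prepended (so the second half comes out already reversed).
--     if style == STYLE_ONE_PER_PAGE:
--         n = count + count % 2
--         fronts, backs = [], []
--         for t in range(n // 2):
--             fronts.append(2 * t)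
--             backs = [2 * t + 1] + backs
--         yield from fronts
--         if n != count:
--             yield -1
--         yield -2
--         yield from backs
--     elif style == STYLE_TWO_PER_PAGE:
--         n = (count + 3) // 4 * 4
--         fronts, backs = [], []
--         for t in range(n // 4):
--             a = n - 1 - 2 * t
--             b = n - 2 - 2 * t
--             fronts += [a if a < count else -1, 2 * t]
--             backs = [2 * t + 1, b if b < count else -1] + backs
--         yield from fronts
--         yield -2
--         yield from backs
-- ===== Notes on version B (the rewrite author's own statement) =====
-- stated objective: alternative
-- what changed: Replaces A's two separate range loops per style (evens forward, then a step -2 countdown recomputing j = all_count - i - 1) by a single sheet-by-sheet loop that builds the front half by appending and the already-reversed back half by prepending a pair accumulator.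
import Mathlib
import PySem

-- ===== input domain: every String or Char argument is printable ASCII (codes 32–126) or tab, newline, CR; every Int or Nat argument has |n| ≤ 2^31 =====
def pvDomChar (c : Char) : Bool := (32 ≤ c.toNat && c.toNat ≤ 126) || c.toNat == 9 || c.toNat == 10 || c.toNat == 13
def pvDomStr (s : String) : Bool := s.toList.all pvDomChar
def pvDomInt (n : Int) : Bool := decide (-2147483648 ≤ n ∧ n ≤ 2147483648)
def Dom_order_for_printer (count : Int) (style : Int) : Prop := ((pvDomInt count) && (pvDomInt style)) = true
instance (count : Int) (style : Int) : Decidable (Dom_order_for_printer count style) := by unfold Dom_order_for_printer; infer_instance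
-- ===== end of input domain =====

-- B replaces A's two separate yield loops per style by ONE sheet-by-sheet loop that
-- builds the front half (appending) and the already-reversed back half (prepending)
-- simultaneously; objective: alternative decomposition, same cost. Both Pythons are
-- generators; equivalence is about the yielded sequence (ported as a list).

-- ===== PORT A =====
-- A is a generator: each `yield` appends to the output list; the two `for i in range(...)`
-- loops become foldl over PySem.List.pyRange with the same per-step appends.
def order_for_printer (count : Int) (style : Int) : List Int :=
  if style = 0 then
    let all_count := if PySem.Int.mod count 2 = 0 then count else count + 1
    let out := (PySem.List.pyRange 0 all_count 2).foldl (fun acc i => acc ++ [i]) []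
    let out := if all_count ≠ count then out ++ [-1] else out
    let out := out ++ [-2]
    (PySem.List.pyRange (all_count - 1) 0 (-2)).foldl (fun acc i => acc ++ [i]) out
  else if style = 1 then
    let all_count := ((count + 3) >>> (2:Nat)) <<< (2:Nat)
    let out := (PySem.List.pyRange 0 (all_count >>> (1:Nat)) 2).foldl
      (fun acc i =>
        let j := all_count - i - 1
        acc ++ [if j < count then j else -1] ++ [i]) []
    let out := out ++ [-2]
    (PySem.List.pyRange ((all_count >>> (1:Nat)) - 1) 0 (-2)).foldl
      (fun acc i =>
        let j := all_count - i - 1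
        acc ++ [i] ++ [if j < count then j else -1]) out
  else []

-- ===== PORT B =====
-- B's single loop per style: a pair accumulator (fronts, backs); fronts appended,
-- backs prepended (Python `backs = [..] + backs` is cons on the left).
def order_for_printer_alt (count : Int) (style : Int) : List Int :=
  if style = 0 then
    let n := count + PySem.Int.mod count 2
    let fb := (PySem.List.pyRange 0 (PySem.Int.floordiv n 2) 1).foldl
      (fun (p : List Int × List Int) t => (p.1 ++ [2*t], (2*t+1) :: p.2)) ([], [])
    fb.1 ++ (if n ≠ count then [-1] else []) ++ [-2] ++ fb.2
  else if style = 1 then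
    let n := PySem.Int.floordiv (count + 3) 4 * 4
    let fb := (PySem.List.pyRange 0 (PySem.Int.floordiv n 4) 1).foldl
      (fun (p : List Int × List Int) t =>
        (p.1 ++ [if n - 1 - 2*t < count then n - 1 - 2*t else -1, 2*t],
         (2*t+1) :: (if n - 2 - 2*t < count then n - 2 - 2*t else -1) :: p.2)) ([], [])
    fb.1 ++ [-2] ++ fb.2
  else []

-- ===== PRECONDITION & SPEC =====
def Spec_order_for_printer (count : Int) (style : Int) (out : List Int) : Prop := out = order_for_printer_alt count style
instance (count : Int) (style : Int) (out : List Int) : Decidable (Spec_order_for_printer count style out) := by unfold Spec_order_for_printer; infer_instance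

-- ===== CLAIM (what is proved, stated in full; the proofs are below) =====
def Claim_equal_order_for_printer : Prop := ∀ (count : Int) (style : Int), Dom_order_for_printer count style → Spec_order_for_printer count style (order_for_printer count style)

-- ===== LEMMAS AND PROOFS =====

theorem pv_foldl_cons2 {α : Type} (f g : α → Int) (l : List α) (a : List Int) :
    List.foldl (fun acc x => f x :: g x :: acc) a l
      = l.reverse.flatMap (fun x => [f x, g x]) ++ a := by
  induction l generalizing a with
  | nil => simp
  | cons x xs ih => simp [ih, List.flatMap_append]

theorem pv_reverse_map_range {α : Type} (f : Nat → α) (Q : Nat) :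
    (List.map f (List.range Q)).reverse = List.map (fun k => f (Q - 1 - k)) (List.range Q) := by
  apply List.ext_getElem
  · simp
  · intro k h1 h2
    simp only [List.length_map, List.length_range, List.length_reverse] at h1 h2
    simp [List.getElem_reverse]

theorem pv_style0 (count : Int) : order_for_printer count 0 = order_for_printer_alt count 0 := by
  have hm2 : PySem.Int.mod count 2 = count % 2 := PySem.Int.mod_eq_emod_of_pos (by norm_num)
  have hfd : PySem.Int.floordiv (count + count % 2) 2 = (count + count % 2) / 2 :=
    PySem.Int.floordiv_eq_ediv_of_pos (by norm_num)
  simp only [order_for_printer, order_for_printer_alt, hm2, hfd]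
  set n := count + count % 2 with hn
  have hac : (if count % 2 = 0 then count else count + 1) = n := by
    split_ifs with h <;> omega
  rw [hac]
  have hev : 2 ∣ n := by omega
  rw [PySem.List.foldl_append_singleton_eq_self, PySem.List.foldl_append_singleton_eq_self]
  rw [PySem.List.foldl_prod_mk (f := fun (acc : List Int) t => acc ++ [2*t])
      (g := fun (acc : List Int) t => (2*t+1) :: acc)]
  rw [PySem.List.foldl_append_singleton_eq_map, List.foldl_flip_cons_eq_append]
  rw [PySem.List.pyRange_one]
  have hG1 : PySem.List.pyRange 0 n 2
      = List.map (fun t => 2*t) (List.map (fun k : Nat => (0:Int) + ↑k) (List.range (n/2 - 0).toNat)) := by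
    rw [PySem.List.pyRange_of_pos _ _ (by norm_num), List.map_map]
    have hc : (if (0:Int) < n then ((n - 0 + 2 - 1) / 2).toNat else 0) = (n/2 - 0).toNat := by
      split_ifs with h <;> omega
    rw [hc]
    apply List.map_congr_left; intro k _; simp
  have hG2 : PySem.List.pyRange (n - 1) 0 (-2)
      = (List.map (fun t => 2*t+1) (List.map (fun k : Nat => (0:Int) + ↑k) (List.range (n/2 - 0).toNat))).reverse := by
    simp only [PySem.List.pyRange]
    norm_num
    apply List.ext_getElem
    · simp
      split_ifs with h <;> omega
    · intro k h1 h2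
      simp only [List.length_map, List.length_range, List.length_reverse] at h1 h2
      simp only [List.getElem_map, List.getElem_reverse, List.length_map, List.length_range,
        List.getElem_range, Function.comp]
      split_ifs at h1 <;> omega
  rw [hG1, hG2]
  simp only [List.nil_append]
  split_ifs with h <;> simp

theorem pv_style1 (count : Int) : order_for_printer count 1 = order_for_printer_alt count 1 := by
  have hsr : (count + 3) >>> (2:Nat) = (count + 3) / 4 := by
    simpa using Int.shiftRight_eq_div_pow (count + 3) 2
  have hfd4 : PySem.Int.floordiv (count + 3) 4 = (count + 3) / 4 :=
    PySem.Int.floordiv_eq_ediv_of_pos (by norm_num)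
  have hsl : ((count + 3) / 4) <<< (2:Nat) = (count + 3) / 4 * 4 := by
    simp [Int.shiftLeft_eq]
  have hz : ((1:Int) = 0) = False := by norm_num
  have ho : ((1:Int) = 1) = True := by norm_num
  simp only [order_for_printer, order_for_printer_alt, hz, if_false, hsr, hfd4, hsl]
  set n := (count + 3) / 4 * 4 with hn
  have h4 : 4 ∣ n := by omega
  have hsr1 : n >>> (1:Nat) = n / 2 := by
    simpa using Int.shiftRight_eq_div_pow n 1
  have hfdn4 : PySem.Int.floordiv n 4 = n / 4 := PySem.Int.floordiv_eq_ediv_of_pos (by norm_num)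
  simp only [hsr1, hfdn4]
  rw [PySem.List.foldl_prod_mk
    (f := fun (acc : List Int) t => acc ++ [if n - 1 - 2*t < count then n - 1 - 2*t else -1, 2*t])
    (g := fun (acc : List Int) t => (2*t+1) :: (if n - 2 - 2*t < count then n - 2 - 2*t else -1) :: acc)]
  simp only [List.append_assoc, List.singleton_append]
  rw [PySem.List.foldl_append_eq_flatMap, PySem.List.foldl_append_eq_flatMap,
    PySem.List.foldl_append_eq_flatMap, pv_foldl_cons2]
  simp only [List.nil_append, List.append_nil]
  have hG1 : List.flatMap (fun i => [if n - i - 1 < count then n - i - 1 else -1, i])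
        (PySem.List.pyRange 0 (n / 2) 2)
      = List.flatMap (fun t => [if n - 1 - 2 * t < count then n - 1 - 2 * t else -1, 2 * t])
        (PySem.List.pyRange 0 (n / 4)) := by
    rw [PySem.List.pyRange_of_pos _ _ (by norm_num : (0:Int) < 2), PySem.List.pyRange_one]
    rw [List.flatMap_map, List.flatMap_map]
    have hc : (if (0:Int) < n / 2 then ((n / 2 - 0 + 2 - 1) / 2).toNat else 0) = (n / 4 - 0).toNat := by
      split_ifs with h <;> omega
    rw [hc]
    apply List.flatMap_congr
    intro k hk
    have e1 : n - (0 + 2 * (k:Int)) - 1 = n - 1 - 2 * (0 + (k:Int)) := by ring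
    have e2 : (0:Int) + 2 * (k:Int) = 2 * (0 + (k:Int)) := by ring
    rw [e1, e2]
  have hG2 : List.flatMap (fun i => [i, if n - i - 1 < count then n - i - 1 else -1])
        (PySem.List.pyRange (n / 2 - 1) 0 (-2))
      = List.flatMap (fun x => [2 * x + 1, if n - 2 - 2 * x < count then n - 2 - 2 * x else -1])
        (PySem.List.pyRange 0 (n / 4)).reverse := by
    rw [PySem.List.pyRange_one]
    simp only [PySem.List.pyRange]
    norm_num
    rw [pv_reverse_map_range, List.flatMap_map, List.flatMap_map]
    have hc : (if (1:Int) < n / 2 then ((n / 2 - 1 + 2 - 1) / 2).toNat else 0) = (n / 4).toNat := by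
      split_ifs with h <;> omega
    rw [hc]
    apply List.flatMap_congr
    intro k hk
    simp only [List.mem_range] at hk
    have h1 : n / 2 - 1 + -(2 * (k:Int)) = 2 * (((n / 4).toNat - 1 - k : Nat):Int) + 1 := by omega
    rw [h1]
    simp only [List.cons.injEq, and_true, true_and]
    split_ifs with hA hB <;> omega
  rw [hG1, hG2]
  simp

-- ===== VERDICT (by name: the statement is the Claim_ definition above) =====
theorem order_for_printer_spec : Claim_equal_order_for_printer := by
  intro count style _
  unfold Spec_order_for_printer
  by_cases h0 : style = 0
  · subst h0; exact pv_style0 count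
  · by_cases h1 : style = 1
    · subst h1; exact pv_style1 count
    · simp [order_for_printer, order_for_printer_alt, h0, h1]
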